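-- pv_equiv track=rewrite | github.com/Fangolinn/Advent-of-Code | 2015/11/solve.py | is_valid_rule_contains_two_pairs
-- ===== SOURCE A (Python) =====
-- def is_valid_rule_contains_two_pairs(password: str) -> bool:
--     """
--     Passwords must contain at least two different, non-overlapping pairs of letters, like aa, bb, or zz.
--     """
--     pairs_found: int = 0
--
--     i: int = 0
--     while i < len(password) - 1:
--         if password[i] == password[i + 1]:
--             pairs_found += 1
--             i += 1
--
--         if pairs_found >= 2:
--             return True
--
--         i += 1
--
--     return False
-- ===== SOURCE B (Python) =====
-- def is_valid_rule_contains_two_pairs(password: str) -> bool: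
--     """Run-length decomposition: each maximal run of equal characters of
--     length L contributes L // 2 non-overlapping pairs; need at least two."""
--     pairs = 0
--     pos = 0
--     n = len(password)
--     while pos < n:
--         run = pos + 1
--         while run < n and password[run] == password[pos]:
--             run += 1
--         pairs += (run - pos) // 2
--         pos = run
--     return pairs >= 2
-- ===== Notes on version B (the rewrite author's own statement) =====
-- stated objective: alternative
-- what changed: Replaces A's match-then-skip adjacent-comparison walk (with early return) by a run-length decomposition: split the string into maximal runs of equal characters and sum the closed form len(run)//2 per run.
import Mathlib
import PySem

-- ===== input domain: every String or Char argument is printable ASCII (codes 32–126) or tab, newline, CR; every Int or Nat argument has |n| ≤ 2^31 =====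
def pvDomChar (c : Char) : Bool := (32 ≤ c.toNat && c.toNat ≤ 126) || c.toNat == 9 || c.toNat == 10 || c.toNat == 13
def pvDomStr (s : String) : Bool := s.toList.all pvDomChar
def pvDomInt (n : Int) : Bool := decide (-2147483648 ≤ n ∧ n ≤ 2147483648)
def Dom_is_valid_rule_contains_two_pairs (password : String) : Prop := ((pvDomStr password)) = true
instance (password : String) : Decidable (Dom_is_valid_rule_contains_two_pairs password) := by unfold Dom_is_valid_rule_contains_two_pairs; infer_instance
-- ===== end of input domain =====

-- B replaces A's match-then-skip adjacent-comparison walk by a run-length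
-- decomposition summing len(run) // 2 per maximal run; objective: alternative, same cost.


-- ===== PORT A =====
-- A's while loop over index i with counter pairs_found and early return
-- (fuel bounds the loop and never runs out on the call below; indices are
-- always in range when read, so the ' ' default of getD is never used)
def pvALoop (cs : List Char) : Nat → Nat → Nat → Bool
  | 0, _, _ => false
  | fuel + 1, i, pairs =>
    if i + 1 < cs.length then
      if cs[i]?.getD ' ' = cs[i + 1]?.getD ' ' then
        -- pairs_found += 1; i += 1
        if pairs + 1 ≥ 2 then true
        else pvALoop cs fuel (i + 2) (pairs + 1)
      else
        if pairs ≥ 2 then true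
        else pvALoop cs fuel (i + 1) pairs
    else false

def is_valid_rule_contains_two_pairs (password : String) : Bool :=
  pvALoop password.toList password.toList.length 0 0

-- ===== PORT B =====
-- inner while: advance run past every character equal to password[pos]
-- (fuel = remaining length bounds the loop; it never runs out on the call below)
def pvRunEnd (cs : List Char) (pos : Nat) : Nat → Nat → Nat
  | 0, run => run
  | fuel + 1, run =>
    if run < cs.length ∧ cs[run]?.getD ' ' = cs[pos]?.getD ' ' then
      pvRunEnd cs pos fuel (run + 1)
    else run

-- outer while: one iteration per maximal run, adding (run - pos) // 2
def pvBLoop (cs : List Char) : Nat → Nat → Nat → Nat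
  | 0, _, pairs => pairs
  | fuel + 1, pos, pairs =>
    if pos < cs.length then
      let run := pvRunEnd cs pos cs.length (pos + 1)
      pvBLoop cs fuel run (pairs + (run - pos) / 2)
    else pairs

def is_valid_rule_contains_two_pairs_alt (password : String) : Bool :=
  decide (2 ≤ pvBLoop password.toList password.toList.length 0 0)

-- ===== PRECONDITION & SPEC =====
def Spec_is_valid_rule_contains_two_pairs (password : String) (out : Bool) : Prop := out = is_valid_rule_contains_two_pairs_alt password
instance (password : String) (out : Bool) : Decidable (Spec_is_valid_rule_contains_two_pairs password out) := by unfold Spec_is_valid_rule_contains_two_pairs; infer_instance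

-- ===== CLAIM (what is proved, stated in full; the proofs are below) =====
def Claim_equal_is_valid_rule_contains_two_pairs : Prop := ∀ (password : String), Dom_is_valid_rule_contains_two_pairs password → Spec_is_valid_rule_contains_two_pairs password (is_valid_rule_contains_two_pairs password)

-- ===== LEMMAS AND PROOFS =====

-- reference count: greedy number of non-overlapping adjacent pairs
def pvGreedy : List Char → Nat
  | a :: b :: r => if a = b then 1 + pvGreedy r else pvGreedy (b :: r)
  | _ => 0

theorem pvGreedy_short (l : List Char) (h : l.length ≤ 1) : pvGreedy l = 0 := by
  match l, h with
  | [], _ => rfl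
  | [a], _ => rfl

-- A's loop computes the greedy count (capped at 2)
theorem pvALoop_eq (n : ℕ) : ∀ (cs : List Char) (fuel i pairs : Nat),
    cs.length - i ≤ n → n ≤ fuel → pairs ≤ 1 →
    pvALoop cs fuel i pairs = decide (2 ≤ pairs + pvGreedy (cs.drop i)) := by
  induction n with
  | zero =>
    intro cs fuel i pairs hn hf hp
    have h1 : ¬ (i + 1 < cs.length) := by omega
    have hg : pvGreedy (cs.drop i) = 0 := pvGreedy_short _ (by simp; omega)
    match fuel with
    | 0 => rw [hg]; simp [pvALoop]; omega
    | fuel + 1 => rw [pvALoop, if_neg h1, hg]; simp; omega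
  | succ n ih =>
    intro cs fuel i pairs hn hf hp
    by_cases h : i + 1 < cs.length
    · have hi : i < cs.length := by omega
      match fuel with
      | fuel + 1 =>
      have hd : cs.drop i = cs[i] :: cs[i+1] :: cs.drop (i + 2) := by
        rw [List.drop_eq_getElem_cons hi, List.drop_eq_getElem_cons h]
      have hgd : (cs[i]?.getD ' ' = cs[i + 1]?.getD ' ') ↔ cs[i] = cs[i+1] := by
        rw [List.getElem?_eq_getElem hi, List.getElem?_eq_getElem h,
          Option.getD_some, Option.getD_some]
      rw [pvALoop, if_pos h, hd]
      by_cases he : cs[i] = cs[i+1]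
      · rw [if_pos (hgd.mpr he)]
        unfold pvGreedy
        rw [if_pos he]
        interval_cases pairs
        · simp only [Nat.zero_add]
          rw [if_neg (by omega), ih cs fuel (i + 2) 1 (by omega) (by omega) (by omega)]
        · rw [if_pos (by omega)]
          exact (decide_eq_true (by omega)).symm
      · rw [if_neg (fun hc => he (hgd.mp hc)), if_neg (by omega),
          ih cs fuel (i + 1) pairs (by omega) (by omega) hp,
          List.drop_eq_getElem_cons h]
        simp only [pvGreedy]
        simp only [if_neg he]
    · have hg : pvGreedy (cs.drop i) = 0 := pvGreedy_short _ (by simp; omega)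
      match fuel with
      | 0 => rw [hg]; simp [pvALoop]; omega
      | fuel + 1 => rw [pvALoop, if_neg h, hg]; simp; omega

-- the greedy count of a maximal run of k copies of a is k / 2
theorem pvGreedy_run (k : ℕ) : ∀ (a : Char) (rest : List Char),
    (∀ b r, rest = b :: r → b ≠ a) →
    pvGreedy (List.replicate k a ++ rest) = k / 2 + pvGreedy rest := by
  induction k using Nat.strong_induction_on with
  | _ k ih =>
    intro a rest hrest
    match k with
    | 0 => simp
    | 1 =>
      simp only [List.replicate, List.nil_append, List.cons_append]
      match rest, hrest with
      | [], _ => rfl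
      | b :: r, hr =>
        have hne : ¬ a = b := by intro hab; exact hr b r rfl hab.symm
        simp only [pvGreedy]
        rw [if_neg hne]
        omega
    | (m + 2) =>
      have h2 : List.replicate (m + 2) a ++ rest
          = a :: a :: (List.replicate m a ++ rest) := by
        simp [List.replicate]
      have h3 : pvGreedy (a :: a :: (List.replicate m a ++ rest))
          = 1 + pvGreedy (List.replicate m a ++ rest) := by
        simp [pvGreedy]
      rw [h2, h3, ih m (by omega) a rest hrest]
      omega

-- characterisation of the inner while loop
theorem pvRunEnd_spec (cs : List Char) (pos : Nat) (hpos : pos < cs.length)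
    (n : ℕ) : ∀ (run : Nat), cs.length - run ≤ n → pos < run → run ≤ cs.length →
    (∀ j, pos ≤ j → j < run → (hj : j < cs.length) → cs[j] = cs[pos]) →
    run ≤ pvRunEnd cs pos n run ∧ pvRunEnd cs pos n run ≤ cs.length ∧
    (∀ j, pos ≤ j → j < pvRunEnd cs pos n run → (hj : j < cs.length) → cs[j] = cs[pos]) ∧
    (∀ h : pvRunEnd cs pos n run < cs.length, cs[pvRunEnd cs pos n run] ≠ cs[pos]) := by
  induction n with
  | zero =>
    intro run hn hlt hle hall
    simp only [pvRunEnd]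
    exact ⟨le_refl _, hle, hall, fun h => absurd h (by omega)⟩
  | succ n ih =>
    intro run hn hlt hle hall
    by_cases hc : run < cs.length ∧ cs[run]?.getD ' ' = cs[pos]?.getD ' '
    · rw [pvRunEnd, if_pos hc]
      have h1 : run < cs.length := hc.1
      have heq : cs[run] = cs[pos] := by
        have := hc.2
        rwa [List.getElem?_eq_getElem h1, List.getElem?_eq_getElem hpos,
          Option.getD_some, Option.getD_some] at this
      obtain ⟨a1, a2, a3, a4⟩ := ih (run + 1) (by omega) (by omega) (by omega)
        (by intro j hj1 hj2 hj3
            by_cases hcj : j = run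
            · subst hcj; exact heq
            · exact hall j hj1 (by omega) hj3)
      exact ⟨by omega, a2, a3, a4⟩
    · rw [pvRunEnd, if_neg hc]
      refine ⟨le_refl _, hle, hall, ?_⟩
      intro hR hne
      exact hc ⟨hR, by rw [List.getElem?_eq_getElem hR, List.getElem?_eq_getElem hpos,
        Option.getD_some, Option.getD_some, hne]⟩

-- B's loop computes pairs + greedy of the remaining suffix
theorem pvBLoop_eq (n : ℕ) : ∀ (cs : List Char) (fuel pos pairs : Nat),
    cs.length - pos ≤ n → n ≤ fuel →
    pvBLoop cs fuel pos pairs = pairs + pvGreedy (cs.drop pos) := by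
  induction n with
  | zero =>
    intro cs fuel pos pairs hn hf
    have hge : ¬ pos < cs.length := by omega
    match fuel with
    | 0 =>
      rw [List.drop_eq_nil_of_le (by omega)]
      simp [pvBLoop, pvGreedy]
    | fuel + 1 =>
      rw [pvBLoop, if_neg hge, List.drop_eq_nil_of_le (by omega)]
      simp [pvGreedy]
  | succ n ih =>
    intro cs fuel pos pairs hn hf
    by_cases h : pos < cs.length
    · match fuel with
      | fuel + 1 =>
      rw [pvBLoop, if_pos h]
      have spec := pvRunEnd_spec cs pos h cs.length (pos + 1) (by omega) (by omega)
        (by omega)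
        (by intro j hj1 hj2 hj3; have hjp : j = pos := by omega
            subst hjp; rfl)
      set R := pvRunEnd cs pos cs.length (pos + 1) with hR
      obtain ⟨h1, h2, h3, h4⟩ := spec
      have hdrop : cs.drop pos = List.replicate (R - pos) cs[pos] ++ cs.drop R := by
        apply List.ext_getElem
        · simp; omega
        · intro j hja hjb
          simp only [List.getElem_drop]
          by_cases hj : j < R - pos
          · rw [List.getElem_append_left (by simp; omega)]
            simp only [List.getElem_replicate]
            exact h3 (pos + j) (by omega) (by omega) (by omega)
          · rw [List.getElem_append_right (by simp; omega)]
            simp only [List.getElem_drop, List.length_replicate]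
            congr 1
            omega
      have hmax : ∀ b r, cs.drop R = b :: r → b ≠ cs[pos] := by
        intro b r hbr
        have hRlt : R < cs.length := by
          by_contra hcon
          rw [List.drop_eq_nil_of_le (by omega)] at hbr
          simp at hbr
        have h0 : (cs.drop R)[0]? = some b := by rw [hbr]; rfl
        rw [List.getElem?_drop, Nat.add_zero, List.getElem?_eq_getElem hRlt] at h0
        have hb : cs[R] = b := Option.some.inj h0
        rw [← hb]
        exact h4 hRlt
      rw [ih cs fuel R (pairs + (R - pos) / 2) (by omega) (by omega), hdrop,
        pvGreedy_run (R - pos) cs[pos] (cs.drop R) hmax]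
      omega
    · match fuel with
      | 0 =>
        rw [List.drop_eq_nil_of_le (by omega)]
        simp [pvBLoop, pvGreedy]
      | fuel + 1 =>
        rw [pvBLoop, if_neg h, List.drop_eq_nil_of_le (by omega)]
        simp [pvGreedy]

-- ===== VERDICT (by name: the statement is the Claim_ definition above) =====
theorem is_valid_rule_contains_two_pairs_spec : Claim_equal_is_valid_rule_contains_two_pairs := by
  intro password _
  unfold Spec_is_valid_rule_contains_two_pairs is_valid_rule_contains_two_pairs
    is_valid_rule_contains_two_pairs_alt
  rw [pvALoop_eq password.toList.length password.toList password.toList.length 0 0 (by omega) (by omega) (by omega),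
    pvBLoop_eq password.toList.length password.toList password.toList.length 0 0 (by omega) (by omega)]
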